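-- pv_equiv track=rewrite | github.com/tlgs/leetcode | 1742.py | countBalls
-- ===== SOURCE A (Python) =====
-- def countBalls(lowLimit: int, highLimit: int) -> int:
--     counts = [0] * 46
--
--     first, t = lowLimit, 0
--     while first:
--         t += first % 10
--         first //= 10
--
--     counts[t] = 1
--
--     for ball in range(lowLimit + 1, highLimit + 1):
--         while ball % 10 == 0:
--             t -= 9
--             ball //= 10
--
--         t += 1
--         counts[t] += 1
--
--     return max(counts)
-- ===== SOURCE B (Python) =====
-- def _digit_sum(n):
--     s = 0
--     while n > 0:
--         s += n % 10
--         n //= 10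
--     return s
--
--
-- def _sums_upto(n):
--     """histogram[s] = how many k in [0, n] have digit sum s (s in 0..45); n >= 0."""
--     if n < 10:
--         return [1 if s <= n else 0 for s in range(46)]
--     q, r = divmod(n, 10)
--     sub = _sums_upto(q - 1)          # histogram of the higher parts 0 .. q-1
--     dq = _digit_sum(q)
--     return [sum(sub[s - b] for b in range(10) if s - b >= 0)
--             + (1 if dq <= s <= dq + r else 0)
--             for s in range(46)]
--
--
-- def countBalls(lowLimit: int, highLimit: int) -> int:
--     # bucket lowLimit itself, then add the digit-sum histogram of (lowLimit, highLimit]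
--     # computed by digit DP (prefix histograms), O(log(highLimit) * 46 * 10).
--     counts = [0] * 46
--     counts[_digit_sum(lowLimit)] = 1
--     if highLimit > lowLimit:
--         hi, lo = _sums_upto(highLimit), _sums_upto(lowLimit)
--         counts = [counts[s] + hi[s] - lo[s] for s in range(46)]
--     return max(counts)
-- ===== Notes on version B (the rewrite author's own statement) =====
-- stated objective: faster
-- what changed: A walks every ball in [lowLimit, highLimit] maintaining an incremental digit sum; B computes the digit-sum histogram of a whole prefix [0..n] by a digit DP (recursing on n//10, convolving with the 10 possible last digits), takes the difference of two prefix histograms plus lowLimit's own bucket, and returns its max.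
-- outside the precondition, e.g. on countBalls(1000000, 5): A returns 1, B returns 1
import Mathlib
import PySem

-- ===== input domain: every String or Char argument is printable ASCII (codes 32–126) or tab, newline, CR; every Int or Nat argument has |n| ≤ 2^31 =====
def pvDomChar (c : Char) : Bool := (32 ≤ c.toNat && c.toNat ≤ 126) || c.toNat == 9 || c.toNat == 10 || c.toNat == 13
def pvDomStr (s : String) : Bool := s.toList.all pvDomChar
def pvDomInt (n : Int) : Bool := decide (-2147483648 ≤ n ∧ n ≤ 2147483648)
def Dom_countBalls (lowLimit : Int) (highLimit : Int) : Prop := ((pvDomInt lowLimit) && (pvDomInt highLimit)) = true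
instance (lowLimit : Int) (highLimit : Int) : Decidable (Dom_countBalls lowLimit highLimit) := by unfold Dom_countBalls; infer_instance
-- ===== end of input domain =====

-- B replaces A's per-ball O(highLimit-lowLimit) counting loop by a digit-DP that builds the
-- digit-sum histogram of a whole prefix [0..n] in O(log n * 46 * 10); return values agree on all of Pre_.

-- termination fact for the `//= 10` loops of both ports (cited by their decreasing_by)
theorem pvFloordiv10_toNat_lt (n : Int) (h : 0 < n) : (PySem.Int.floordiv n 10).toNat < n.toNat := by
  have hn : ((n.toNat : ℕ) : Int) = n := Int.toNat_of_nonneg h.le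
  have hfd : PySem.Int.floordiv ((n.toNat : ℕ) : Int) 10 = ((n.toNat / 10 : ℕ) : Int) := by
    exact_mod_cast PySem.Int.floordiv_natCast n.toNat 10
  rw [← hn, hfd]
  have : n.toNat / 10 < n.toNat := Nat.div_lt_self (by omega) (by omega)
  omega

theorem pvSumsDec (n : Int) (h : ¬ n < 10) : (PySem.Int.floordiv n 10 - 1).toNat < n.toNat := by
  have hn : ((n.toNat : ℕ) : Int) = n := Int.toNat_of_nonneg (by omega)
  have hfd : PySem.Int.floordiv ((n.toNat : ℕ) : Int) 10 = ((n.toNat / 10 : ℕ) : Int) := by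
    exact_mod_cast PySem.Int.floordiv_natCast n.toNat 10
  rw [← hn, hfd]
  have : n.toNat / 10 < n.toNat := Nat.div_lt_self (by omega) (by omega)
  omega

-- ===== PORT A =====
-- `while first: t += first % 10; first //= 10`.  Python's test is `first != 0`; for first < 0 the
-- Python loop never terminates (excluded by Pre_), so the port tests `0 < first` to be total.
def pvWhileFirst (first t : Int) : Int :=
  if 0 < first then pvWhileFirst (PySem.Int.floordiv first 10) (t + PySem.Int.mod first 10) else t
termination_by first.toNat
decreasing_by exact pvFloordiv10_toNat_lt first (by assumption)

-- inner `while ball % 10 == 0: t -= 9; ball //= 10`.  The `0 < ball` conjunct only makes the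
-- recursion total (Python diverges at ball = 0; under Pre_ the loop is reached with ball ≥ 1).
def pvWhileBall (t ball : Int) : Int × Int :=
  if PySem.Int.mod ball 10 = 0 ∧ 0 < ball then pvWhileBall (t - 9) (PySem.Int.floordiv ball 10)
  else (t, ball)
termination_by ball.toNat
decreasing_by exact pvFloordiv10_toNat_lt ball (by omega)

def countBalls (lowLimit : Int) (highLimit : Int) : Int :=
  let counts0 := PySem.List.pyRepeat [(0 : Int)] 46
  let t0 := pvWhileFirst lowLimit 0
  let counts1 := PySem.List.pySetD counts0 t0 1
  let st := (PySem.List.pyRange (lowLimit + 1) (highLimit + 1) 1).foldl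
    (fun st ball =>
      let tb := pvWhileBall st.1 ball
      let t := tb.1 + 1
      (t, PySem.List.pySetD st.2 t (PySem.List.pyGetD st.2 t 0 + 1))) (t0, counts1)
  match PySem.List.max? st.2 (fun x => x) with
  | some m => m
  | none => 0   -- max([]) raises in Python; counts always has 46 entries, so this is unreachable

-- ===== PORT B =====
-- Source B `_digit_sum`: `while n > 0: s += n % 10; n //= 10`
def pvDigitSumLoop (n s : Int) : Int :=
  if 0 < n then pvDigitSumLoop (PySem.Int.floordiv n 10) (s + PySem.Int.mod n 10) else s
termination_by n.toNat
decreasing_by exact pvFloordiv10_toNat_lt n (by assumption)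

def pvDigitSum (n : Int) : Int := pvDigitSumLoop n 0

-- Source B `_sums_upto`: histogram[s] = #{k in [0..n] : digit_sum k = s} by digit DP
def pvSumsUpto (n : Int) : List Int :=
  if n < 10 then (PySem.List.pyRange 0 46 1).map (fun s => if s ≤ n then (1 : Int) else 0)
  else
    let q := PySem.Int.floordiv n 10
    let r := PySem.Int.mod n 10
    let sub := pvSumsUpto (q - 1)
    let dq := pvDigitSum q
    (PySem.List.pyRange 0 46 1).map (fun s =>
      ((PySem.List.pyRange 0 10 1).filter (fun b => decide (0 ≤ s - b))).foldl
        (fun acc b => acc + PySem.List.pyGetD sub (s - b) 0) 0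
      + (if dq ≤ s ∧ s ≤ dq + r then (1 : Int) else 0))
termination_by n.toNat
decreasing_by exact pvSumsDec n (by assumption)

def countBalls_alt (lowLimit : Int) (highLimit : Int) : Int :=
  let counts0 := PySem.List.pyRepeat [(0 : Int)] 46
  let counts1 := PySem.List.pySetD counts0 (pvDigitSum lowLimit) 1
  let counts2 :=
    if lowLimit < highLimit then
      let hi := pvSumsUpto highLimit
      let lo := pvSumsUpto lowLimit
      (PySem.List.pyRange 0 46 1).map (fun s =>
        PySem.List.pyGetD counts1 s 0 + PySem.List.pyGetD hi s 0 - PySem.List.pyGetD lo s 0)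
    else counts1
  match PySem.List.max? counts2 (fun x => x) with
  | some m => m
  | none => 0   -- counts2 always has 46 entries

-- ===== PRECONDITION & SPEC =====
-- Pre_ excludes lowLimit < 0, where A's first `while` loop never terminates, and keeps both limits
-- ≤ 99999 (the problem's 1 ≤ lowLimit ≤ highLimit ≤ 10^5 constraint, under which every digit sum
-- fits the 46 buckets): for larger limits A can raise IndexError (digit sums > 45), though the
-- simple bound also drops some large inputs on which A still returns (see the cites in the claim).
def Pre_countBalls (lowLimit : Int) (highLimit : Int) : Prop :=
  0 ≤ lowLimit ∧ lowLimit ≤ 99999 ∧ highLimit ≤ 99999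
instance (lowLimit : Int) (highLimit : Int) : Decidable (Pre_countBalls lowLimit highLimit) := by
  unfold Pre_countBalls; infer_instance

def pvWitness_countBalls : Int × Int := (1, 10)

def Spec_countBalls (lowLimit : Int) (highLimit : Int) (out : Int) : Prop := out = countBalls_alt lowLimit highLimit
instance (lowLimit : Int) (highLimit : Int) (out : Int) : Decidable (Spec_countBalls lowLimit highLimit out) := by unfold Spec_countBalls; infer_instance

-- ===== CLAIM (what is proved, stated in full; the proofs are below) =====
def Claim_equal_countBalls : Prop := ∀ (lowLimit : Int) (highLimit : Int), Dom_countBalls lowLimit highLimit → Pre_countBalls lowLimit highLimit → Spec_countBalls lowLimit highLimit (countBalls lowLimit highLimit)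

-- ===== LEMMAS AND PROOFS =====

-- cast forms of // 10 and % 10 (numeral divisor)
theorem pvFd10 (m : ℕ) : PySem.Int.floordiv ((m : ℕ) : Int) 10 = ((m / 10 : ℕ) : Int) := by
  exact_mod_cast PySem.Int.floordiv_natCast m 10

theorem pvMd10 (m : ℕ) : PySem.Int.mod ((m : ℕ) : Int) 10 = ((m % 10 : ℕ) : Int) := by
  exact_mod_cast PySem.Int.mod_natCast m 10

-- spec-side digit sum and counting functions
def dsum (n : ℕ) : ℕ := (Nat.digits 10 n).sum

def cntS (n s : ℕ) : ℕ := (List.range n).countP (fun k => dsum k == s)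

def hcnt (L m s : ℕ) : ℕ := (List.range' (L + 1) (m - L)).countP (fun k => dsum k == s)

def indList (L : ℕ) : List Int := (List.range 46).map (fun s => if dsum L = s then (1 : Int) else 0)

def histList (L m : ℕ) : List Int :=
  (List.range 46).map (fun s => (if dsum L = s then (1 : Int) else 0) + (hcnt L m s : Int))

theorem dsum_zero : dsum 0 = 0 := by simp [dsum]

theorem dsum_rec (n : ℕ) (h : 0 < n) : dsum n = n % 10 + dsum (n / 10) := by
  unfold dsum
  rw [Nat.digits_def' (by omega : 1 < 10) h]
  simp

theorem dsum_lt10 (n : ℕ) (h : n < 10) : dsum n = n := by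
  rcases Nat.eq_zero_or_pos n with h0 | h0
  · simp [h0, dsum_zero]
  · rw [dsum_rec n h0, Nat.mod_eq_of_lt h, Nat.div_eq_of_lt h, dsum_zero]
    omega

theorem dsum_split (a b : ℕ) (hb : b < 10) : dsum (10 * a + b) = dsum a + b := by
  rcases Nat.eq_zero_or_pos (10 * a + b) with h0 | h0
  · have ha : a = 0 := by omega
    have hb0 : b = 0 := by omega
    simp [ha, hb0, dsum_zero]
  · rw [dsum_rec _ h0]
    have h1 : (10 * a + b) % 10 = b := by omega
    have h2 : (10 * a + b) / 10 = a := by omega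
    rw [h1, h2]; omega

theorem dsum_bound (k : ℕ) : ∀ n, n < 10 ^ k → dsum n ≤ 9 * k := by
  induction k with
  | zero => intro n hn; interval_cases n; simp [dsum_zero]
  | succ k ih =>
    intro n hn
    rcases Nat.eq_zero_or_pos n with h0 | h0
    · simp [h0, dsum_zero]
    · rw [dsum_rec n h0]
      have h1 : n / 10 < 10 ^ k := by
        rw [Nat.div_lt_iff_lt_mul (by omega)]
        calc n < 10 ^ (k + 1) := hn
        _ = 10 ^ k * 10 := by ring
      have := ih (n / 10) h1
      have := Nat.mod_lt n (show 0 < 10 by omega)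
      omega

theorem dsum_le45 (n : ℕ) (h : n ≤ 99999) : dsum n ≤ 45 := by
  have := dsum_bound 5 n (by omega)
  omega

-- the digit-sum loops compute dsum
theorem pvWhileFirst_eq (n : ℕ) : ∀ t : Int, pvWhileFirst (n : Int) t = t + dsum n := by
  induction n using Nat.strong_induction_on with
  | _ n ih =>
    intro t
    rw [pvWhileFirst]
    rcases Nat.eq_zero_or_pos n with h0 | h0
    · simp [h0, dsum_zero]
    · rw [if_pos (by exact_mod_cast h0)]
      rw [pvFd10, pvMd10]
      rw [ih (n / 10) (Nat.div_lt_self h0 (by omega))]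
      rw [dsum_rec n h0]
      push_cast; ring

theorem pvDigitSumLoop_eq (n : ℕ) : ∀ s : Int, pvDigitSumLoop (n : Int) s = s + dsum n := by
  induction n using Nat.strong_induction_on with
  | _ n ih =>
    intro s
    rw [pvDigitSumLoop]
    rcases Nat.eq_zero_or_pos n with h0 | h0
    · simp [h0, dsum_zero]
    · rw [if_pos (by exact_mod_cast h0)]
      rw [pvFd10, pvMd10]
      rw [ih (n / 10) (Nat.div_lt_self h0 (by omega))]
      rw [dsum_rec n h0]
      push_cast; ring

theorem pvDigitSum_eq (n : ℕ) : pvDigitSum (n : Int) = (dsum n : Int) := by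
  unfold pvDigitSum
  rw [pvDigitSumLoop_eq]; simp

-- the trailing-zero stripping loop turns dsum (ball-1) into dsum ball - 1
theorem pvWhileBall_eq (ball : ℕ) (h : 1 ≤ ball) :
    (pvWhileBall ((dsum (ball - 1) : ℕ) : Int) (ball : Int)).1 = (dsum ball : Int) - 1 := by
  induction ball using Nat.strong_induction_on with
  | _ ball ih =>
    rw [pvWhileBall]
    by_cases hm : ball % 10 = 0
    · have h10 : 10 ≤ ball := by omega
      have ha1 : 1 ≤ ball / 10 := by omega
      have cond : PySem.Int.mod (ball : Int) 10 = 0 ∧ (0 : Int) < (ball : Int) := by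
        refine ⟨?_, by exact_mod_cast h⟩
        rw [pvMd10, hm]; rfl
      rw [if_pos cond, pvFd10]
      have hb1 : ball - 1 = 10 * (ball / 10 - 1) + 9 := by omega
      have hds : dsum (ball - 1) = dsum (ball / 10 - 1) + 9 := by
        rw [hb1, dsum_split _ 9 (by omega)]
      have harg : ((dsum (ball - 1) : ℕ) : Int) - 9 = ((dsum (ball / 10 - 1) : ℕ) : Int) := by
        rw [hds]; push_cast; ring
      rw [harg, ih (ball / 10) (Nat.div_lt_self (by omega) (by omega)) ha1]
      have hq : dsum ball = dsum (ball / 10) := by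
        have e : dsum (10 * (ball / 10) + 0) = dsum (ball / 10) + 0 := dsum_split _ 0 (by omega)
        have e2 : 10 * (ball / 10) + 0 = ball := by omega
        rw [e2] at e
        omega
      rw [hq]
    · have cond : ¬(PySem.Int.mod (ball : Int) 10 = 0 ∧ (0 : Int) < (ball : Int)) := by
        rintro ⟨c1, _⟩
        rw [pvMd10] at c1
        exact hm (by exact_mod_cast c1)
      rw [if_neg cond]
      have hbm : 1 ≤ ball % 10 := by omega
      have e1 : ball = 10 * (ball / 10) + ball % 10 := by omega
      have e2 : ball - 1 = 10 * (ball / 10) + (ball % 10 - 1) := by omega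
      have d1 : dsum ball = dsum (ball / 10) + ball % 10 := by
        conv_lhs => rw [e1]
        exact dsum_split _ _ (by omega)
      have d2 : dsum (ball - 1) = dsum (ball / 10) + (ball % 10 - 1) := by
        rw [e2]; exact dsum_split _ _ (by omega)
      simp only []
      rw [d1, d2]; push_cast; omega

-- list-shape helpers: set / get on a `map` over `range`
theorem pySetD_map_range (n : ℕ) (f : ℕ → Int) (k : ℕ) (_hk : k < n) (v : Int) :
    PySem.List.pySetD ((List.range n).map f) ((k : ℕ) : Int) v
      = (List.range n).map (fun s => if s = k then v else f s) := by
  rw [PySem.List.pySetD_of_nonneg _ _ (Int.natCast_nonneg k)]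
  rw [Int.toNat_natCast]
  apply List.ext_getElem
  · simp
  · intro i h1 h2
    simp only [List.getElem_set, List.getElem_map, List.getElem_range]
    rcases eq_or_ne i k with he | he
    · simp [he]
    · rw [if_neg (fun hh => he hh.symm), if_neg he]

theorem pyGetD_map_range' (n : ℕ) (f : ℕ → Int) (k : ℕ) (hk : k < n) (d : Int) :
    PySem.List.pyGetD ((List.range n).map f) ((k : ℕ) : Int) d = f k := by
  rw [PySem.List.pyGetD_natCast]
  rw [List.getD_eq_getElem _ _ (by simpa using hk)]
  simp

theorem pyRepeat_zero_eq : PySem.List.pyRepeat [(0 : Int)] 46 = (List.range 46).map (fun _ => (0 : Int)) := by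
  rw [PySem.List.pyRepeat_singleton]
  apply List.ext_getElem
  · simp
  · intro i h1 h2
    simp

-- counting helpers
theorem cntS_succ (n s : ℕ) : cntS (n + 1) s = cntS n s + if dsum n = s then 1 else 0 := by
  unfold cntS
  rw [List.range_succ, List.countP_append]
  simp [List.countP_cons, beq_iff_eq]

theorem hcnt_self (L s : ℕ) : hcnt L L s = 0 := by
  simp [hcnt]

theorem hcnt_succ (L m s : ℕ) (h : L ≤ m) :
    hcnt L (m + 1) s = hcnt L m s + if dsum (m + 1) = s then 1 else 0 := by
  unfold hcnt
  have h1 : (m + 1) - L = (m - L) + 1 := by omega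
  rw [h1, List.range'_concat, List.countP_append]
  have h2 : L + 1 + 1 * (m - L) = m + 1 := by omega
  rw [h2]
  simp [List.countP_cons, beq_iff_eq]

theorem cntS_split (L H s : ℕ) (h : L ≤ H) :
    cntS (H + 1) s = cntS (L + 1) s + hcnt L H s := by
  unfold cntS hcnt
  have h1 : H + 1 = (L + 1) + (H - L) := by omega
  rw [h1, List.range_add, List.countP_append]
  congr 1
  rw [List.countP_map, List.range'_eq_map_range, List.countP_map]

-- A's loop invariant
theorem foldA_inv (L : ℕ) (_hL : L ≤ 99999) :
    ∀ m : ℕ, L ≤ m → m ≤ 99999 →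
      (PySem.List.pyRange ((L : Int) + 1) ((m : Int) + 1) 1).foldl
        (fun st ball =>
          let tb := pvWhileBall st.1 ball
          let t := tb.1 + 1
          (t, PySem.List.pySetD st.2 t (PySem.List.pyGetD st.2 t 0 + 1)))
        (((dsum L : ℕ) : Int), indList L)
      = (((dsum m : ℕ) : Int), histList L m) := by
  intro m hm
  induction m, hm using Nat.le_induction with
  | base =>
    intro _
    rw [PySem.List.pyRange_one_eq_nil (le_refl _)]
    simp only [List.foldl_nil]
    unfold histList indList
    congr 1
    apply List.map_congr_left
    intro s _
    simp [hcnt_self]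
  | succ m hm ih =>
    intro h99
    have ih' := ih (by omega)
    have hsplit : PySem.List.pyRange ((L : Int) + 1) (((m + 1 : ℕ) : Int) + 1) 1
        = PySem.List.pyRange ((L : Int) + 1) ((m : Int) + 1) 1 ++ [((m : Int) + 1)] := by
      have he : (((m + 1 : ℕ) : Int) + 1) = ((m : Int) + 1) + 1 := by push_cast; ring
      rw [he, PySem.List.pyRange_one_succ_right (by omega)]
    rw [hsplit, List.foldl_append, ih']
    simp only [List.foldl_cons, List.foldl_nil]
    have hball : ((m : Int) + 1) = (((m + 1 : ℕ) : ℕ) : Int) := by push_cast; ring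
    have hds : ((dsum m : ℕ) : Int) = ((dsum ((m + 1) - 1) : ℕ) : Int) := by simp
    have hwb : (pvWhileBall ((dsum m : ℕ) : Int) ((m : Int) + 1)).1 = ((dsum (m + 1) : ℕ) : Int) - 1 := by
      rw [hball, hds]; exact pvWhileBall_eq (m + 1) (by omega)
    have ht : (pvWhileBall ((dsum m : ℕ) : Int) ((m : Int) + 1)).1 + 1 = ((dsum (m + 1) : ℕ) : Int) := by
      rw [hwb]; ring
    rw [ht]
    have hd46 : dsum (m + 1) < 46 := by have := dsum_le45 (m + 1) h99; omega
    unfold histList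
    rw [pyGetD_map_range' 46 _ (dsum (m + 1)) hd46, pySetD_map_range 46 _ (dsum (m + 1)) hd46]
    congr 1
    apply List.map_congr_left
    intro s _
    have hstep := hcnt_succ L m s hm
    rcases eq_or_ne s (dsum (m + 1)) with he | he
    · subst he
      rw [if_pos rfl, hstep, if_pos rfl]
      push_cast; ring
    · rw [if_neg he, hstep, if_neg (show ¬dsum (m + 1) = s from fun hh => he hh.symm)]
      simp

-- B-side counting lemmas
theorem sum_map_add_nat (l : List ℕ) (f g : ℕ → ℕ) :
    (l.map (fun b => f b + g b)).sum = (l.map f).sum + (l.map g).sum := by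
  induction l with
  | nil => simp
  | cons x t ih => simp [ih]; omega

theorem blk (a s : ℕ) : ∀ r, r ≤ 10 →
    (List.range r).countP (fun b => dsum (10 * a + b) == s)
      = if dsum a ≤ s ∧ s < dsum a + r then 1 else 0 := by
  intro r
  induction r with
  | zero =>
    intro _
    simp only [List.range_zero, List.countP_nil]
    split_ifs <;> omega
  | succ r ih =>
    intro hr
    rw [List.range_succ, List.countP_append, ih (by omega)]
    have hd : dsum (10 * a + r) = dsum a + r := dsum_split a r (by omega)
    simp only [List.countP_cons, List.countP_nil, hd, beq_iff_eq, zero_add]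
    split_ifs <;> omega

theorem blk2 (q s : ℕ) : ∀ r, r ≤ 10 →
    ((List.range r).map (fun b => if b ≤ s ∧ dsum q = s - b then 1 else 0)).sum
      = if dsum q ≤ s ∧ s < dsum q + r then 1 else 0 := by
  intro r
  induction r with
  | zero =>
    intro _
    simp only [List.range_zero, List.map_nil, List.sum_nil]
    split_ifs <;> omega
  | succ r ih =>
    intro hr
    rw [List.range_succ, List.map_append, List.sum_append, ih (by omega)]
    simp only [List.map_cons, List.map_nil, List.sum_cons, List.sum_nil]
    split_ifs <;> omega

theorem cntS_add_block (q m s : ℕ) :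
    cntS (10 * q + m) s
      = cntS (10 * q) s + (List.range m).countP (fun b => dsum (10 * q + b) == s) := by
  unfold cntS
  rw [List.range_add, List.countP_append, List.countP_map]
  rfl

theorem cnt_tens (s : ℕ) : ∀ q,
    cntS (10 * q) s = ((List.range 10).map (fun b => if b ≤ s then cntS q (s - b) else 0)).sum := by
  intro q
  induction q with
  | zero => simp [cntS]
  | succ q ih =>
    have h1 : 10 * (q + 1) = 10 * q + 10 := by ring
    rw [h1, cntS_add_block q 10 s, ih, blk q s 10 (le_refl 10)]
    have h3 : (List.range 10).map (fun b => if b ≤ s then cntS (q + 1) (s - b) else 0)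
        = (List.range 10).map
            (fun b => (if b ≤ s then cntS q (s - b) else 0) + (if b ≤ s ∧ dsum q = s - b then 1 else 0)) := by
      apply List.map_congr_left
      intro b _
      simp only [cntS_succ]
      split_ifs <;> omega
    rw [h3, sum_map_add_nat, blk2 q s 10 (le_refl 10)]

theorem cnt_step (q r s : ℕ) (hr : r < 10) :
    cntS (10 * q + r + 1) s
      = ((List.range 10).map (fun b => if b ≤ s then cntS q (s - b) else 0)).sum
        + (if dsum q ≤ s ∧ s ≤ dsum q + r then 1 else 0) := by
  have h0 : 10 * q + r + 1 = 10 * q + (r + 1) := by ring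
  rw [h0, cntS_add_block q (r + 1) s, cnt_tens s q, blk q s (r + 1) (by omega)]
  split_ifs <;> omega

theorem sum_filter_ite (l : List ℕ) (p : ℕ → Bool) (f : ℕ → Int) :
    ((l.filter p).map f).sum = (l.map (fun b => if p b then f b else 0)).sum := by
  induction l with
  | nil => simp
  | cons x t ih =>
    by_cases hx : p x
    · simp [hx, ih]
    · simp [hx, ih]

theorem cast_sum_map_ite (l : List ℕ) (s : ℕ) (f : ℕ → ℕ) :
    (((l.map (fun b => if b ≤ s then f b else 0)).sum : ℕ) : Int)
      = (l.map (fun b => if b ≤ s then ((f b : ℕ) : Int) else 0)).sum := by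
  induction l with
  | nil => simp
  | cons x t ih =>
    simp only [List.map_cons, List.sum_cons]
    rw [Nat.cast_add, ih]
    congr 1
    split_ifs <;> simp

theorem sumsUpto_eq (n : ℕ) (h : n ≤ 99999) :
    pvSumsUpto (n : Int) = (List.range 46).map (fun s => ((cntS (n + 1) s : ℕ) : Int)) := by
  revert h
  induction n using Nat.strong_induction_on with
  | _ n ih =>
    intro h
    rw [pvSumsUpto]
    have hr46 : PySem.List.pyRange 0 46 1 = (List.range 46).map (fun k => ((k : ℕ) : Int)) := by
      simpa using PySem.List.pyRange_zero_nat 46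
    by_cases hn : n < 10
    · rw [if_pos (by exact_mod_cast hn)]
      rw [hr46, List.map_map]
      apply List.map_congr_left
      intro s hs
      have hs46 : s < 46 := List.mem_range.mp hs
      have hcnt1 : cntS (n + 1) s = if s ≤ n then 1 else 0 := by
        unfold cntS
        have hcg : ∀ k ∈ List.range (n + 1), ((dsum k == s) = true ↔ (k == s) = true) := by
          intro k hk
          have : k < n + 1 := List.mem_range.mp hk
          rw [dsum_lt10 k (by omega)]
        rw [List.countP_congr hcg]
        simpa [List.count] using List.count_range (a := s) (n := n + 1)
      dsimp only [Function.comp]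
      rw [hcnt1]
      have hiff : ((s : Int) ≤ (n : Int)) ↔ s ≤ n := by exact_mod_cast Iff.rfl
      rw [if_congr hiff rfl rfl]
      split_ifs <;> simp
    · rw [if_neg (by exact_mod_cast hn)]
      have hq1 : 1 ≤ n / 10 := by omega
      have hfd : PySem.Int.floordiv (n : Int) 10 = ((n / 10 : ℕ) : Int) := pvFd10 n
      have hmd : PySem.Int.mod (n : Int) 10 = ((n % 10 : ℕ) : Int) := pvMd10 n
      have hsub1 : PySem.Int.floordiv (n : Int) 10 - 1 = ((n / 10 - 1 : ℕ) : Int) := by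
        rw [hfd]; omega
      have hsub : pvSumsUpto (PySem.Int.floordiv (n : Int) 10 - 1)
          = (List.range 46).map (fun t => ((cntS (n / 10) t : ℕ) : Int)) := by
        rw [hsub1, ih (n / 10 - 1) (by omega) (by omega)]
        have he : n / 10 - 1 + 1 = n / 10 := by omega
        rw [he]
      have hdq : pvDigitSum (PySem.Int.floordiv (n : Int) 10) = ((dsum (n / 10) : ℕ) : Int) := by
        rw [hfd]; exact pvDigitSum_eq (n / 10)
      dsimp only
      rw [hsub, hdq, hmd, hr46, List.map_map]
      apply List.map_congr_left
      intro s hs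
      have hs46 : s < 46 := List.mem_range.mp hs
      dsimp only [Function.comp]
      rw [PySem.List.foldl_add]
      have hr10 : PySem.List.pyRange 0 10 1 = (List.range 10).map (fun k => ((k : ℕ) : Int)) := by
        simpa using PySem.List.pyRange_zero_nat 10
      rw [hr10, List.filter_map, List.map_map]
      have hfp : (List.range 10).filter ((fun b => decide (0 ≤ (s : Int) - b)) ∘ (fun k => ((k : ℕ) : Int)))
          = (List.range 10).filter (fun b => b ≤ s) := by
        apply List.filter_congr
        intro b _
        simp only [Function.comp, decide_eq_decide]
        omega
      rw [hfp]
      have hmapv : ((List.range 10).filter (fun b => b ≤ s)).map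
            ((fun b => PySem.List.pyGetD ((List.range 46).map (fun t => ((cntS (n / 10) t : ℕ) : Int))) ((s : Int) - b) 0) ∘ (fun k => ((k : ℕ) : Int)))
          = ((List.range 10).filter (fun b => b ≤ s)).map (fun b => ((cntS (n / 10) (s - b) : ℕ) : Int)) := by
        apply List.map_congr_left
        intro b hb
        have hbs : b ≤ s := by
          have := List.mem_filter.mp hb
          exact by simpa using this.2
        have hcast : (s : Int) - (b : Int) = (((s - b : ℕ) : ℕ) : Int) := by omega
        dsimp only [Function.comp]
        rw [hcast]
        exact pyGetD_map_range' 46 _ (s - b) (by omega) 0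
      rw [hmapv, sum_filter_ite]
      have hmm : (List.range 10).map (fun b => if decide (b ≤ s) = true then ((cntS (n / 10) (s - b) : ℕ) : Int) else 0)
          = (List.range 10).map (fun b => if b ≤ s then ((cntS (n / 10) (s - b) : ℕ) : Int) else 0) := by
        apply List.map_congr_left
        intro b _
        simp
      rw [hmm, ← cast_sum_map_ite (List.range 10) s (fun b => cntS (n / 10) (s - b))]
      have hnsplit : n + 1 = 10 * (n / 10) + (n % 10) + 1 := by omega
      rw [hnsplit, cnt_step (n / 10) (n % 10) s (by omega)]
      have hiff2 : ((dsum (n / 10) : ℕ) : Int) ≤ (s : Int) ∧ (s : Int) ≤ ((dsum (n / 10) : ℕ) : Int) + ((n % 10 : ℕ) : Int)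
          ↔ dsum (n / 10) ≤ s ∧ s ≤ dsum (n / 10) + n % 10 := by
        constructor <;> intro hc <;> constructor <;> omega
      rw [if_congr hiff2 rfl rfl]
      push_cast
      split_ifs <;> ring

-- ===== VERDICT (by name: the statement is the Claim_ definition above) =====
theorem countBalls_spec : Claim_equal_countBalls := by
  intro low high _ hpre
  obtain ⟨hl0, hl9, hh9⟩ := hpre
  unfold Spec_countBalls countBalls countBalls_alt
  set L := low.toNat with hLdef
  have hlow : ((L : ℕ) : Int) = low := Int.toNat_of_nonneg hl0
  have hL99 : L ≤ 99999 := by omega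
  have hd46 : dsum L < 46 := by have := dsum_le45 L hL99; omega
  have ht0 : pvWhileFirst low 0 = ((dsum L : ℕ) : Int) := by
    rw [← hlow, pvWhileFirst_eq]; simp
  have htB : pvDigitSum low = ((dsum L : ℕ) : Int) := by rw [← hlow]; exact pvDigitSum_eq L
  have hinit : PySem.List.pySetD (PySem.List.pyRepeat [(0 : Int)] 46) ((dsum L : ℕ) : Int) 1 = indList L := by
    rw [pyRepeat_zero_eq, pySetD_map_range 46 _ (dsum L) hd46]
    unfold indList
    apply List.map_congr_left
    intro s _
    rcases eq_or_ne s (dsum L) with he | he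
    · simp [he]
    · rw [if_neg he, if_neg (fun hh => he hh.symm)]
  dsimp only
  rw [ht0, htB, hinit]
  by_cases hlh : low < high
  · have hh0 : (0 : Int) ≤ high := by omega
    set H := high.toNat with hHdef
    have hhigh : ((H : ℕ) : Int) = high := Int.toNat_of_nonneg hh0
    have hH99 : H ≤ 99999 := by omega
    have hLH : L ≤ H := by omega
    rw [if_pos hlh, ← hlow, ← hhigh]
    rw [foldA_inv L hL99 H hLH hH99]
    rw [sumsUpto_eq H hH99, sumsUpto_eq L hL99]
    have hr46 : PySem.List.pyRange 0 46 1 = (List.range 46).map (fun k => ((k : ℕ) : Int)) := by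
      simpa using PySem.List.pyRange_zero_nat 46
    have hmap : (PySem.List.pyRange 0 46 1).map (fun s =>
          PySem.List.pyGetD (indList L) s 0
          + PySem.List.pyGetD ((List.range 46).map (fun t => ((cntS (H + 1) t : ℕ) : Int))) s 0
          - PySem.List.pyGetD ((List.range 46).map (fun t => ((cntS (L + 1) t : ℕ) : Int))) s 0)
        = histList L H := by
      rw [hr46, List.map_map]
      unfold histList
      apply List.map_congr_left
      intro s hs
      have hs46 : s < 46 := List.mem_range.mp hs
      dsimp only [Function.comp]
      have hind : PySem.List.pyGetD (indList L) ((s : ℕ) : Int) 0 = if dsum L = s then (1 : Int) else 0 := by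
        unfold indList; exact pyGetD_map_range' 46 _ s hs46 0
      rw [hind, pyGetD_map_range' 46 _ s hs46, pyGetD_map_range' 46 _ s hs46]
      rw [cntS_split L H s hLH]
      push_cast; ring
    rw [hmap]
  · rw [if_neg hlh]
    have hnil : PySem.List.pyRange (low + 1) (high + 1) 1 = [] :=
      PySem.List.pyRange_one_eq_nil (by omega)
    rw [hnil]
    rfl
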